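-- pv_equiv track=rewrite | github.com/pyRis/Deep-Learning-for-processing-of-literary-text | code/EN/baseline/utils/process_asr.py | check_multi_lines
-- ===== SOURCE A (Python) =====
-- def check_multi_lines(line):
--     tokens = line.split(" ")
--     sublines = []
--     for token in tokens:
--         if token.count("-") > 2:
--             sublines.append("")
--             sublines[-1] = sublines[-1] + token
--         else:
--             if len(sublines) == 0:
--                 continue
--             else:
--                 sublines[-1] = sublines[-1] + " " + token
--     if len(sublines) > 1:
--         check = True
--     else:
--         check = False
--
--     return check, sublines
-- ===== SOURCE B (Python) =====
-- def check_multi_lines(line):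
--     tokens = line.split(" ")
--     bounds = [i for i, t in enumerate(tokens) if t.count("-") > 2]
--     sublines = []
--     for j, b in enumerate(bounds):
--         end = bounds[j + 1] if j + 1 < len(bounds) else len(tokens)
--         sublines.append(" ".join(tokens[b:end]))
--     return len(sublines) > 1, sublines
-- ===== Notes on version B (the rewrite author's own statement) =====
-- stated objective: alternative
-- what changed: replaces A's single incremental fold that keeps appending tokens onto the last accumulated string with an index-first construction: one pass collects the boundary indices (tokens with more than two dashes), a second pass emits each group as a slice-join between consecutive boundaries
import Mathlib
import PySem

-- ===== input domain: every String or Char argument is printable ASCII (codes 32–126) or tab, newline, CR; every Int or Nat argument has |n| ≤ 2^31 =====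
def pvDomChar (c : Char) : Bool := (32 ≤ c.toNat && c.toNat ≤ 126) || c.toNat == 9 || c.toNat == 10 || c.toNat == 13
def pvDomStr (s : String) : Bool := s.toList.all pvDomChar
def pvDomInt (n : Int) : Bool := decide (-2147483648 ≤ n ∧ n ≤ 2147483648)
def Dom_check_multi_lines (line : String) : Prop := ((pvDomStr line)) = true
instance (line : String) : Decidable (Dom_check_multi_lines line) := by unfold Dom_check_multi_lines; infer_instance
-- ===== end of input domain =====

-- B groups tokens between boundary indices by slice-and-join instead of A's incremental last-string accumulation; same cost, different decomposition (objective: alternative).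

-- ===== PORT A =====
def check_multi_lines (line : String) : Bool × List String :=
  let tokens := (PySem.Str.split? line " ").getD []   -- line.split(" "); sep ≠ "" so split? is always some
  let sublines := tokens.foldl (fun sublines token =>
    if 2 < PySem.Str.count token "-" then
      -- sublines.append(""); sublines[-1] = sublines[-1] + token
      let s2 := sublines ++ [""]
      s2.dropLast ++ [s2.getLast! ++ token]
    else if sublines.length = 0 then sublines
    else sublines.dropLast ++ [sublines.getLast! ++ " " ++ token]) []
  (decide (1 < sublines.length), sublines)

-- ===== PORT B =====
def check_multi_lines_alt (line : String) : Bool × List String :=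
  let tokens := (PySem.Str.split? line " ").getD []   -- line.split(" "); sep ≠ "" so split? is always some
  let bounds := (PySem.List.enumerate tokens).filterMap
      (fun p => if 2 < PySem.Str.count p.2 "-" then some p.1 else none)
  let sublines := (PySem.List.enumerate bounds).map (fun q =>
      let e : Int := if q.1 + 1 < (bounds.length : Int)
                     then PySem.List.pyGetD bounds (q.1 + 1) 0
                     else (tokens.length : Int)
      PySem.Str.join " " (PySem.List.slice tokens (some q.2) (some e)))
  (decide (1 < sublines.length), sublines)

-- ===== PRECONDITION & SPEC =====
def Spec_check_multi_lines (line : String) (out : Bool × List String) : Prop := out = check_multi_lines_alt line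
instance (line : String) (out : Bool × List String) : Decidable (Spec_check_multi_lines line out) := by unfold Spec_check_multi_lines; infer_instance

-- ===== CLAIM (what is proved, stated in full; the proofs are below) =====
def Claim_equal_check_multi_lines : Prop := ∀ (line : String), Dom_check_multi_lines line → Spec_check_multi_lines line (check_multi_lines line)

-- ===== LEMMAS AND PROOFS =====

-- the boundary test, as both ports use it
def pvCnt (t : String) : Bool := decide (2 < PySem.Str.count t "-")

-- A's loop body, named
def pvStepA (sublines : List String) (token : String) : List String :=
  if 2 < PySem.Str.count token "-" then
    let s2 := sublines ++ [""]
    s2.dropLast ++ [s2.getLast! ++ token]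
  else if sublines.length = 0 then sublines
  else sublines.dropLast ++ [sublines.getLast! ++ " " ++ token]

-- the common specification: the list of token groups, as token lists
def pvGroup (cur : List String) : List String → List (List String)
  | [] => [cur]
  | t :: ts => if 2 < PySem.Str.count t "-" then cur :: pvGroup [t] ts else pvGroup (cur ++ [t]) ts

def pvSpec : List String → List (List String)
  | [] => []
  | t :: ts => if 2 < PySem.Str.count t "-" then pvGroup [t] ts else pvSpec ts

-- B's boundary indices, as naturals
def pvBnds : List String → List Nat
  | [] => []
  | t :: ts => if 2 < PySem.Str.count t "-" then 0 :: (pvBnds ts).map (· + 1) else (pvBnds ts).map (· + 1)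

-- the chunk of tokens between one pair of consecutive boundaries
def pvChunkF (ts : List String) (p : Nat × Nat) : List String := (ts.drop p.1).take (p.2 - p.1)

def pvChunksOf (ts : List String) : List (List String) :=
  ((pvBnds ts).zip ((pvBnds ts).tail ++ [ts.length])).map (pvChunkF ts)

lemma charsJoinSnoc (sep : List Char) (ps : List (List Char)) (h : ps ≠ []) (q : List Char) :
    PySem.Chars.join sep (ps ++ [q]) = PySem.Chars.join sep ps ++ sep ++ q := by
  induction ps with
  | nil => simp at h
  | cons p rest ih =>
    cases rest with
    | nil => simp [PySem.Chars.join_cons_cons, PySem.Chars.join_singleton]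
    | cons r rs =>
      simp only [List.cons_append, PySem.Chars.join_cons_cons]
      rw [← List.cons_append, ih (by simp)]
      simp

lemma pvJoinSingle (t : String) : PySem.Str.join " " [t] = t := by
  apply String.toList_inj.mp
  simp [PySem.Str.toList_join, PySem.Chars.join_singleton]

lemma pvJoinSnoc (cur : List String) (h : cur ≠ []) (t : String) :
    PySem.Str.join " " (cur ++ [t]) = PySem.Str.join " " cur ++ " " ++ t := by
  apply String.toList_inj.mp
  rw [PySem.Str.toList_join, List.map_append, List.map_singleton,
    charsJoinSnoc _ _ (by simpa using h)]
  simp [PySem.Str.toList_join]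

lemma pvA1 (ts : List String) (acc : List String) (cur : List String) (h : cur ≠ []) :
    List.foldl pvStepA (acc ++ [PySem.Str.join " " cur]) ts
      = acc ++ (pvGroup cur ts).map (PySem.Str.join " ") := by
  induction ts generalizing acc cur with
  | nil => simp [pvGroup]
  | cons t ts ih =>
    rw [List.foldl_cons]
    by_cases hc : 2 < PySem.Str.count t "-"
    · rw [show pvStepA (acc ++ [PySem.Str.join " " cur]) t
          = (acc ++ [PySem.Str.join " " cur]) ++ [PySem.Str.join " " [t]] by
        simp only [pvStepA, if_pos hc]
        simp [pvJoinSingle, String.empty_append]]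
      rw [ih _ [t] (by simp)]
      simp only [pvGroup, if_pos hc]
      simp
    · rw [show pvStepA (acc ++ [PySem.Str.join " " cur]) t
          = acc ++ [PySem.Str.join " " (cur ++ [t])] by
        simp only [pvStepA, if_neg hc]
        simp [pvJoinSnoc cur h t]]
      rw [ih _ (cur ++ [t]) (by simp)]
      simp only [pvGroup, if_neg hc]

lemma pvA2 (ts : List String) :
    List.foldl pvStepA [] ts = (pvSpec ts).map (PySem.Str.join " ") := by
  induction ts with
  | nil => simp [pvSpec]
  | cons t ts ih =>
    rw [List.foldl_cons]
    by_cases hc : 2 < PySem.Str.count t "-"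
    · rw [show pvStepA [] t = [] ++ [PySem.Str.join " " [t]] by
        simp only [pvStepA, if_pos hc]
        simp [pvJoinSingle, String.empty_append]]
      rw [pvA1 _ _ [t] (by simp)]
      simp only [pvSpec, if_pos hc]
      simp
    · rw [show pvStepA [] t = [] by simp only [pvStepA, if_neg hc]; simp]
      rw [ih]
      simp only [pvSpec, if_neg hc]

lemma pvB1 (ts : List String) (s : Int) :
    (PySem.List.enumerate ts s).filterMap
      (fun p => if 2 < PySem.Str.count p.2 "-" then some p.1 else none)
      = (pvBnds ts).map (fun n : Nat => s + (n : Int)) := by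
  induction ts generalizing s with
  | nil => simp [pvBnds, PySem.List.enumerate]
  | cons t ts ih =>
    rw [PySem.List.enumerate_cons, List.filterMap_cons]
    by_cases hc : 2 < PySem.Str.count t "-"
    · simp only [if_pos hc, ih (s + 1), pvBnds]
      simp only [List.map_cons, List.map_map, Nat.cast_zero, add_zero]
      congr 1
      apply List.map_congr_left
      intro n _
      simp only [Function.comp_apply]
      push_cast
      ring
    · simp only [if_neg hc, ih (s + 1), pvBnds]
      simp only [List.map_map]
      apply List.map_congr_left
      intro n _
      simp only [Function.comp_apply]
      push_cast
      ring

lemma pvB2 (bs : List Nat) (ts : List String) :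
    (PySem.List.enumerate ((bs.map (fun n : Nat => (n : Int))))).map (fun q =>
      let e : Int := if q.1 + 1 < (((bs.map (fun n : Nat => (n : Int)))).length : Int)
                     then PySem.List.pyGetD (bs.map (fun n : Nat => (n : Int))) (q.1 + 1) 0
                     else (ts.length : Int)
      PySem.Str.join " " (PySem.List.slice ts (some q.2) (some e)))
      = (bs.zip (bs.tail ++ [ts.length])).map (fun p => PySem.Str.join " " (pvChunkF ts p)) := by
  apply List.ext_getElem
  · simp [PySem.List.length_enumerate, List.length_tail]
    omega
  · intro j h1 h2
    have hj : j < bs.length := by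
      simpa [PySem.List.length_enumerate] using h1
    have hjt : j < (bs.tail ++ [ts.length]).length := by
      simp [List.length_tail]; omega
    rw [List.getElem_map, List.getElem_map, PySem.List.getElem_enumerate, List.getElem_zip]
    simp only [List.getElem_map]
    by_cases hlt : j + 1 < bs.length
    · have hc : (0 : Int) + (j : Int) + 1 < ((bs.map (fun n : Nat => (n : Int))).length : Int) := by
        simp; omega
      rw [if_pos hc]
      have : (0 : Int) + (j : Int) + 1 = ((j + 1 : Nat) : Int) := by push_cast; ring
      rw [this, PySem.List.pyGetD_natCast]
      rw [List.getD_eq_getElem _ _ (by simpa using hlt)]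
      simp only [List.getElem_map]
      rw [PySem.List.slice_natCast]
      have : (bs.tail ++ [ts.length])[j] = bs[j + 1] := by
        rw [List.getElem_append_left (by simp [List.length_tail]; omega)]
        rw [List.getElem_tail]
      rw [this]
      rfl
    · have hc : ¬ ((0 : Int) + (j : Int) + 1 < ((bs.map (fun n : Nat => (n : Int))).length : Int)) := by
        simp; omega
      rw [if_neg hc]
      rw [PySem.List.slice_natCast]
      have : (bs.tail ++ [ts.length])[j] = ts.length := by
        rw [List.getElem_append_right (by simp [List.length_tail]; omega)]
        simp
      rw [this]
      rfl

lemma pvDS (ts : List String) :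
    pvSpec (ts.dropWhile (fun t => !pvCnt t)) = pvSpec ts := by
  induction ts with
  | nil => rfl
  | cons t ts ih =>
    by_cases hc : 2 < PySem.Str.count t "-"
    · rw [List.dropWhile_cons_of_neg (by simpa [pvCnt] using hc)]
    · rw [List.dropWhile_cons_of_pos (by simpa [pvCnt] using hc)]
      rw [ih]
      simp only [pvSpec, if_neg hc]

lemma pvG (ts : List String) (cur : List String) :
    pvGroup cur ts = (cur ++ ts.takeWhile (fun t => !pvCnt t)) :: pvSpec (ts.dropWhile (fun t => !pvCnt t)) := by
  induction ts generalizing cur with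
  | nil => simp [pvGroup, pvSpec]
  | cons t ts ih =>
    by_cases hc : 2 < PySem.Str.count t "-"
    · rw [List.takeWhile_cons_of_neg (by simpa [pvCnt] using hc),
        List.dropWhile_cons_of_neg (by simpa [pvCnt] using hc)]
      simp only [pvGroup, if_pos hc, List.append_nil]
      congr 1
      simp only [pvSpec, if_pos hc]
    · rw [List.takeWhile_cons_of_pos (by simpa [pvCnt] using hc),
        List.dropWhile_cons_of_pos (by simpa [pvCnt] using hc)]
      simp only [pvGroup, if_neg hc]
      rw [ih (cur ++ [t])]
      simp

lemma pvFB (ts : List String) :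
    ts.take ((pvBnds ts).headD ts.length) = ts.takeWhile (fun t => !pvCnt t) := by
  induction ts with
  | nil => simp
  | cons t ts ih =>
    by_cases hc : 2 < PySem.Str.count t "-"
    · simp only [pvBnds, if_pos hc, List.headD_cons, List.take_zero]
      rw [List.takeWhile_cons_of_neg (by simpa [pvCnt] using hc)]
    · simp only [pvBnds, if_neg hc]
      rw [List.takeWhile_cons_of_pos (by simpa [pvCnt] using hc)]
      have hh : ((pvBnds ts).map (· + 1)).headD ((t :: ts).length) = (pvBnds ts).headD ts.length + 1 := by
        cases hb : pvBnds ts <;> simp [List.length_cons]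
      rw [hh, List.take_succ_cons, ih]

lemma pvSH (bs : List Nat) (ts : List String) (t : String) :
    ((bs.map (· + 1)).zip ((bs.map (· + 1)).tail ++ [ts.length + 1])).map (pvChunkF (t :: ts))
      = (bs.zip (bs.tail ++ [ts.length])).map (pvChunkF ts) := by
  have h1 : (bs.map (· + 1)).tail ++ [ts.length + 1] = (bs.tail ++ [ts.length]).map (· + 1) := by
    rw [← List.map_tail, List.map_append]
    rfl
  rw [h1, List.zip_map, List.map_map]
  apply List.map_congr_left
  intro p _
  simp only [Function.comp_apply, Prod.map, pvChunkF, List.drop_succ_cons]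
  congr 1
  omega

lemma pvB3 (ts : List String) : pvChunksOf ts = pvSpec ts := by
  induction ts with
  | nil => rfl
  | cons t ts ih =>
    unfold pvChunksOf at *
    by_cases hc : 2 < PySem.Str.count t "-"
    · simp only [pvBnds, if_pos hc]
      have hz : ((0 :: (pvBnds ts).map (· + 1)).zip ((0 :: (pvBnds ts).map (· + 1)).tail ++ [(t :: ts).length]))
          = (0, (pvBnds ts).headD ts.length + 1)
            :: ((pvBnds ts).map (· + 1)).zip (((pvBnds ts).map (· + 1)).tail ++ [ts.length + 1]) := by
        cases hb : pvBnds ts with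
        | nil => simp [List.length_cons]
        | cons b l => simp [List.length_cons]
      rw [hz, List.map_cons, pvSH _ _ t, ih]
      have hchunk : pvChunkF (t :: ts) (0, (pvBnds ts).headD ts.length + 1)
          = t :: ts.takeWhile (fun t => !pvCnt t) := by
        simp only [pvChunkF, List.drop_zero, Nat.sub_zero, List.take_succ_cons, pvFB]
      rw [hchunk]
      simp only [pvSpec, if_pos hc, pvG]
      rw [pvDS]
      simp
    · simp only [pvBnds, if_neg hc, List.length_cons]
      rw [pvSH _ _ t, ih]
      simp only [pvSpec, if_neg hc]

-- the two sublines computations agree on any token list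
lemma pvMain (ts : List String) :
    List.foldl pvStepA [] ts
      = (PySem.List.enumerate ((PySem.List.enumerate ts).filterMap
          (fun p => if 2 < PySem.Str.count p.2 "-" then some p.1 else none))).map (fun q =>
        let e : Int := if q.1 + 1 < (((PySem.List.enumerate ts).filterMap
              (fun p => if 2 < PySem.Str.count p.2 "-" then some p.1 else none)).length : Int)
                       then PySem.List.pyGetD ((PySem.List.enumerate ts).filterMap
                              (fun p => if 2 < PySem.Str.count p.2 "-" then some p.1 else none)) (q.1 + 1) 0
                       else (ts.length : Int)
        PySem.Str.join " " (PySem.List.slice ts (some q.2) (some e))) := by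
  have hb : (PySem.List.enumerate ts).filterMap
      (fun p => if 2 < PySem.Str.count p.2 "-" then some p.1 else none)
      = (pvBnds ts).map (fun n : Nat => (n : Int)) := by
    rw [pvB1 ts 0]
    simp
  rw [hb, pvB2, pvA2, ← pvB3, pvChunksOf, List.map_map]
  rfl

-- ===== VERDICT (by name: the statement is the Claim_ definition above) =====
theorem check_multi_lines_spec : Claim_equal_check_multi_lines := by
  intro line _
  unfold Spec_check_multi_lines check_multi_lines check_multi_lines_alt
  have h := pvMain ((PySem.Str.split? line " ").getD [])
  simp only [show (fun (sublines : List String) (token : String) =>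
      if 2 < PySem.Str.count token "-" then
        let s2 := sublines ++ [""]
        s2.dropLast ++ [s2.getLast! ++ token]
      else if sublines.length = 0 then sublines
      else sublines.dropLast ++ [sublines.getLast! ++ " " ++ token]) = pvStepA from rfl]
  rw [h]
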